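-- pv_equiv track=rewrite | github.com/OpenDCAI/Paper2Any | dataflow_agent/agentroles/data_agents/datacollector.py | _parse_jina_text_format
-- ===== SOURCE A (Python) =====
-- from typing import Any, Dict, List, Optional
--
-- def _parse_jina_text_format(text: str, original_url: str) -> Dict[str, Any]:
--
--     structured = {
--         "title": "",
--         "url_source": original_url,
--         "warning": "",
--         "markdown": "",
--         "url": original_url
--     }
--
--     lines = text.split('\n')
--     current_section = None
--     markdown_lines = []
--
--     i = 0
--     while i < len(lines):
--         line = lines[i].strip()
--
--         if line.startswith("Title:"):
--             structured["title"] = line[6:].strip()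
--             i += 1
--             continue
--
--         if line.startswith("URL Source:"):
--             structured["url_source"] = line[11:].strip()
--             i += 1
--             continue
--
--         if line.startswith("Warning:"):
--             structured["warning"] = line[8:].strip()
--             i += 1
--             continue
--
--
--         if line == "Markdown Content:":
--             current_section = "markdown"
--             i += 1
--
--             while i < len(lines):
--                 markdown_lines.append(lines[i])
--                 i += 1
--             break
--
--         i += 1
--
--     structured["markdown"] = '\n'.join(markdown_lines).strip()
--
--     return structured
-- ===== SOURCE B (Python) =====
-- def _parse_jina_text_format(text: str, original_url: str):
--     lines = text.split('\n')
--     idx = next((i for i, ln in enumerate(lines) if ln.strip() == "Markdown Content:"), None)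
--     header = lines if idx is None else lines[:idx]
--     title, url_source, warning = "", original_url, ""
--     for ln in header:
--         s = ln.strip()
--         if s.startswith("Title:"):
--             title = s[6:].strip()
--         elif s.startswith("URL Source:"):
--             url_source = s[11:].strip()
--         elif s.startswith("Warning:"):
--             warning = s[8:].strip()
--     markdown = "" if idx is None else '\n'.join(lines[idx + 1:]).strip()
--     return {
--         "title": title,
--         "url_source": url_source,
--         "warning": warning,
--         "markdown": markdown,
--         "url": original_url,
--     }
-- ===== Notes on version B (the rewrite author's own statement) =====
-- stated objective: simpler
-- what changed: Replaces A's single index-driven while loop with continue and a nested drain-the-rest loop by locate-the-marker-first: find the first line whose strip equals 'Markdown Content:', fold the prefix checks over only the header region before it, and take the markdown as one join of the lines after it.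
import Mathlib
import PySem

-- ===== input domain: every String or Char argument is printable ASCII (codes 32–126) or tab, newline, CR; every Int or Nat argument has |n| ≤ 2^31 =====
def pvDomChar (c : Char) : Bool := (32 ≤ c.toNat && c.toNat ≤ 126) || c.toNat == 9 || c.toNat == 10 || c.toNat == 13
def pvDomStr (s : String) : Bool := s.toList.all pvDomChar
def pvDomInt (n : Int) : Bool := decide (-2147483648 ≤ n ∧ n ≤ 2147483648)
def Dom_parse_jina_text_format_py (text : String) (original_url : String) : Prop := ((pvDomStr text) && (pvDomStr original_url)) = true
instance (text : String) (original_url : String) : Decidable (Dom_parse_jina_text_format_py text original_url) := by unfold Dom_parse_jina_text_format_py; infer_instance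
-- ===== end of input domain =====

-- B replaces A's index-driven while/continue scan by locate-the-marker-first then a plain
-- fold over the header region only (objective: simpler decomposition; same cost).
-- The Python dict has five fixed distinct keys, so it is modeled by its mutable fields
-- (title, url_source, warning, markdown) and returned as the literal insertion-order list.

-- ===== PORT A =====
-- A's while-loop with index i and `continue`: structural recursion over the remaining lines,
-- state = the dict's three header fields; the inner while that drains the rest into
-- markdown_lines returns the remaining lines.
def pvLoopA : List String → String → String → String → (String × String × String × List String)
  | [], t, u, w => (t, u, w, [])
  | l :: rest, t, u, w =>
    let line := PySem.Str.strip l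
    if PySem.Str.startswith line "Title:" then
      pvLoopA rest (PySem.Str.strip (PySem.Str.slice line (some 6) none)) u w
    else if PySem.Str.startswith line "URL Source:" then
      pvLoopA rest t (PySem.Str.strip (PySem.Str.slice line (some 11) none)) w
    else if PySem.Str.startswith line "Warning:" then
      pvLoopA rest t u (PySem.Str.strip (PySem.Str.slice line (some 8) none))
    else if line = "Markdown Content:" then
      (t, u, w, rest)
    else
      pvLoopA rest t u w

def parse_jina_text_format_py (text : String) (original_url : String) : List (String × String) :=
  let lines := (PySem.Str.split? text "\n").getD []   -- sep "\n" ≠ "": never none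
  let r := pvLoopA lines "" original_url ""
  [("title", r.1), ("url_source", r.2.1), ("warning", r.2.2.1),
   ("markdown", PySem.Str.strip (PySem.Str.join "\n" r.2.2.2)), ("url", original_url)]

-- ===== PORT B =====
def pvStepB (acc : String × String × String) (ln : String) : String × String × String :=
  let s := PySem.Str.strip ln
  if PySem.Str.startswith s "Title:" then
    (PySem.Str.strip (PySem.Str.slice s (some 6) none), acc.2.1, acc.2.2)
  else if PySem.Str.startswith s "URL Source:" then
    (acc.1, PySem.Str.strip (PySem.Str.slice s (some 11) none), acc.2.2)
  else if PySem.Str.startswith s "Warning:" then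
    (acc.1, acc.2.1, PySem.Str.strip (PySem.Str.slice s (some 8) none))
  else acc

def parse_jina_text_format_py_alt (text : String) (original_url : String) : List (String × String) :=
  let lines := (PySem.Str.split? text "\n").getD []
  let idx? := lines.findIdx? (fun ln => PySem.Str.strip ln = "Markdown Content:")
  let header := match idx? with | none => lines | some i => lines.take i
  let r := header.foldl pvStepB ("", original_url, "")
  let markdown := match idx? with
    | none => ""
    | some i => PySem.Str.strip (PySem.Str.join "\n" (lines.drop (i + 1)))
  [("title", r.1), ("url_source", r.2.1), ("warning", r.2.2),
   ("markdown", markdown), ("url", original_url)]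

-- ===== PRECONDITION & SPEC =====
def Spec_parse_jina_text_format_py (text : String) (original_url : String) (out : List (String × String)) : Prop := out = parse_jina_text_format_py_alt text original_url
instance (text : String) (original_url : String) (out : List (String × String)) : Decidable (Spec_parse_jina_text_format_py text original_url out) := by unfold Spec_parse_jina_text_format_py; infer_instance

-- ===== CLAIM (what is proved, stated in full; the proofs are below) =====
def Claim_equal_parse_jina_text_format_py : Prop := ∀ (text : String) (original_url : String), Dom_parse_jina_text_format_py text original_url → Spec_parse_jina_text_format_py text original_url (parse_jina_text_format_py text original_url)

-- ===== LEMMAS AND PROOFS =====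

-- The marker line starts with none of the three header prefixes (stated on the
-- char lists the goals reduce strings to).
theorem pv_marker_not_title :
    PySem.Chars.startswith ['M','a','r','k','d','o','w','n',' ','C','o','n','t','e','n','t',':'] ['T','i','t','l','e',':'] = false := by decide

theorem pv_marker_not_url :
    PySem.Chars.startswith ['M','a','r','k','d','o','w','n',' ','C','o','n','t','e','n','t',':'] ['U','R','L',' ','S','o','u','r','c','e',':'] = false := by decide

theorem pv_marker_not_warning :
    PySem.Chars.startswith ['M','a','r','k','d','o','w','n',' ','C','o','n','t','e','n','t',':'] ['W','a','r','n','i','n','g',':'] = false := by decide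

theorem pvLoopA_eq (lines : List String) :
    ∀ t u w,
      pvLoopA lines t u w =
        (let idx? := lines.findIdx? (fun ln => PySem.Str.strip ln = "Markdown Content:")
         let header := match idx? with | none => lines | some i => lines.take i
         let r := header.foldl pvStepB (t, u, w)
         let tail := match idx? with | none => ([] : List String) | some i => lines.drop (i + 1)
         (r.1, r.2.1, r.2.2, tail)) := by
  induction lines with
  | nil => intro t u w; simp [pvLoopA]
  | cons l rest ih =>
    intro t u w
    simp only [List.findIdx?_cons]
    by_cases hm : PySem.Str.strip l = "Markdown Content:"
    · simp only [hm, decide_true, if_true]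
      simp [pvLoopA, hm, pv_marker_not_title, pv_marker_not_url, pv_marker_not_warning]
    · have hp : (decide (PySem.Str.strip l = "Markdown Content:")) = false := by simp [hm]
      simp only [hp, Bool.false_eq_true, if_false]
      have expand :
          pvLoopA (l :: rest) t u w = pvLoopA rest (pvStepB (t, u, w) l).1
            (pvStepB (t, u, w) l).2.1 (pvStepB (t, u, w) l).2.2 := by
        simp only [pvLoopA, pvStepB, if_neg hm]
        split_ifs <;> rfl
      rw [expand, ih]
      cases hfi : rest.findIdx? (fun ln => PySem.Str.strip ln = "Markdown Content:") <;>
        simp [List.foldl_cons]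

-- ===== VERDICT (by name: the statement is the Claim_ definition above) =====
theorem parse_jina_text_format_py_spec : Claim_equal_parse_jina_text_format_py := by
  intro text original_url _
  unfold Spec_parse_jina_text_format_py parse_jina_text_format_py parse_jina_text_format_py_alt
  simp only [pvLoopA_eq]
  cases hfi : List.findIdx? (fun ln => decide (PySem.Str.strip ln = "Markdown Content:"))
      ((PySem.Str.split? text "\n").getD []) <;>
    simp [PySem.Str.join, (by decide : PySem.Str.strip "" = "")]
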